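-- pv_equiv track=rewrite | github.com/maxthemagician/BioInformatics3 | Assignment6/Assign6_supl/BooleanNetwork.py | getSequenceFromInt
-- ===== SOURCE A (Python) =====
-- def getSequenceFromInt(i):
--         """Function to print binary number
--         for the input decimal using recursion"""
--         sequence = []
--         while i > 0:
--             sequence.append(i % 2)
--             i = i // 2
--
--         for i in range(len(sequence),6):
--             sequence.append(0)
--         return sequence
-- ===== SOURCE B (Python) =====
-- def getSequenceFromInt(i):
--     if i <= 0:
--         return [0, 0, 0, 0, 0, 0]
--     digits = format(i, 'b')[::-1].ljust(6, '0')
--     return [int(c) for c in digits]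
-- ===== Notes on version B (the rewrite author's own statement) =====
-- stated objective: idiomatic
-- what changed: Replaces A's destructive divide-by-two accumulation loop plus a separate zero-padding loop with a text pipeline: delegate base conversion to format(i,'b'), reverse the string, pad with str.ljust, and parse each character back to an int.
import Mathlib
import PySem

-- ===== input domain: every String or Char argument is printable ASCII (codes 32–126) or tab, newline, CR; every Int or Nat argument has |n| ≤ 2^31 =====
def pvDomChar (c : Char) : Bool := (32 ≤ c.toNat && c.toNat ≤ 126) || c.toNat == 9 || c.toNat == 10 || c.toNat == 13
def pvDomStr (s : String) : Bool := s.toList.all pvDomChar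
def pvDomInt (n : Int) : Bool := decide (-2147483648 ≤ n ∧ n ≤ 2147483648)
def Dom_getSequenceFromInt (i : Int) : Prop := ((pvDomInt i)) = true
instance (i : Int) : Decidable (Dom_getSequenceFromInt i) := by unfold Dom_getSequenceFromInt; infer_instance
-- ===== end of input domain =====

-- B replaces A's divide-by-two accumulation loop plus zero-padding loop with a text pipeline
-- (format(i,'b'), reverse, ljust, parse chars); objective: idiomatic.

-- ===== PORT A =====
-- the 'while i > 0' loop of A, collecting i % 2 and halving i
def pvSeqLoop (i : Int) : List Int :=
  if h : i > 0 then PySem.Int.mod i 2 :: pvSeqLoop (PySem.Int.floordiv i 2) else []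
  termination_by i.toNat
  decreasing_by
    rw [PySem.Int.floordiv_eq_ediv_of_pos (by omega : (0:Int) < 2)]
    omega

def getSequenceFromInt (i : Int) : List Int :=
  -- 'for i in range(len(sequence), 6): sequence.append(0)'
  (PySem.List.pyRange ((pvSeqLoop i).length : Int) 6 1).foldl (fun s _ => s ++ [(0 : Int)]) (pvSeqLoop i)

-- ===== PORT B =====
-- hand port of str.ljust(w, fill) (exact: append fill chars up to width w)
def pvLjust (cs : List Char) (w : Nat) (fill : Char) : List Char :=
  cs ++ List.replicate (w - cs.length) fill

-- hand port of int(c) for a single digit character (exact for the '0'/'1' chars format(i,'b') yields)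
def pvDigitInt (c : Char) : Int := (c.toNat : Int) - 48

def getSequenceFromInt_alt (i : Int) : List Int :=
  if i ≤ 0 then [0, 0, 0, 0, 0, 0]
  else
    -- digits = format(i,'b')[::-1].ljust(6,'0'); [int(c) for c in digits]
    (pvLjust (PySem.Int.toBinChars i).reverse 6 '0').map pvDigitInt

-- ===== PRECONDITION & SPEC =====
def Spec_getSequenceFromInt (i : Int) (out : List Int) : Prop := out = getSequenceFromInt_alt i
instance (i : Int) (out : List Int) : Decidable (Spec_getSequenceFromInt i out) := by unfold Spec_getSequenceFromInt; infer_instance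

-- ===== CLAIM =====
def Claim_equal_getSequenceFromInt : Prop := ∀ (i : Int), Dom_getSequenceFromInt i → Spec_getSequenceFromInt i (getSequenceFromInt i)

-- ===== LEMMAS AND PROOFS =====

-- accumulator law for Nat.toDigitsCore
theorem pvCoreAcc (f : Nat) : ∀ (n : Nat) (l : List Char),
    Nat.toDigitsCore 2 f n l = Nat.toDigitsCore 2 f n [] ++ l := by
  induction f with
  | zero => intro n l; simp [Nat.toDigitsCore]
  | succ f ih =>
    intro n l
    simp only [Nat.toDigitsCore]
    by_cases h : n / 2 = 0
    · simp [h]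
    · rw [if_neg h, if_neg h, ih (n / 2) [(n % 2).digitChar], ih (n / 2) ((n % 2).digitChar :: l)]
      simp

-- fuel irrelevance for Nat.toDigitsCore once the fuel exceeds the number
theorem pvCoreFuel (n : Nat) : ∀ (f f' : Nat), n < f → n < f' →
    Nat.toDigitsCore 2 f n [] = Nat.toDigitsCore 2 f' n [] := by
  induction n using Nat.strong_induction_on with
  | _ n ih =>
    intro f f' hf hf'
    obtain ⟨g, rfl⟩ : ∃ g, f = g + 1 := ⟨f - 1, by omega⟩
    obtain ⟨g', rfl⟩ : ∃ g', f' = g' + 1 := ⟨f' - 1, by omega⟩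
    simp only [Nat.toDigitsCore]
    by_cases h : n / 2 = 0
    · simp [h]
    · rw [if_neg h, if_neg h,
        pvCoreAcc g (n / 2) [(n % 2).digitChar], pvCoreAcc g' (n / 2) [(n % 2).digitChar]]
      have hd : n / 2 < n := Nat.div_lt_self (by omega) (by omega)
      rw [ih (n / 2) hd g g' (by omega) (by omega)]

-- one unfolding step of toDigitsCore when the quotient is nonzero
theorem pvCoreSucc (f n : Nat) (h0 : n / 2 ≠ 0) (l : List Char) :
    Nat.toDigitsCore 2 (f + 1) n l = Nat.toDigitsCore 2 f (n / 2) (Nat.digitChar (n % 2) :: l) := by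
  simp only [Nat.toDigitsCore]
  rw [if_neg h0]

-- the binary-string recursion: last digit is n % 2
theorem pvToDigitsTwoRec (n : Nat) (h : 2 ≤ n) :
    Nat.toDigits 2 n = Nat.toDigits 2 (n / 2) ++ [Nat.digitChar (n % 2)] := by
  show Nat.toDigitsCore 2 (n + 1) n [] = Nat.toDigitsCore 2 (n / 2 + 1) (n / 2) [] ++ [Nat.digitChar (n % 2)]
  have h0 : n / 2 ≠ 0 := by omega
  have hd : n / 2 < n := Nat.div_lt_self (by omega) (by omega)
  rw [pvCoreSucc n n h0, pvCoreAcc n (n / 2) [Nat.digitChar (n % 2)],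
    pvCoreFuel (n / 2) n (n / 2 + 1) (by omega) (by omega)]

-- reversing the binary string and parsing its digits IS A's divmod loop
theorem pvRevMap (n : Nat) (h : 0 < n) :
    ((Nat.toDigits 2 n).reverse).map pvDigitInt = pvSeqLoop (n : Int) := by
  induction n using Nat.strong_induction_on with
  | _ n ih =>
    have hpos : (0:Int) < (n : Int) := by exact_mod_cast h
    rw [pvSeqLoop, dif_pos hpos]
    have hfd : PySem.Int.floordiv (n : Int) 2 = ((n / 2 : Nat) : Int) := by
      exact_mod_cast PySem.Int.floordiv_natCast n 2
    have hmd : PySem.Int.mod (n : Int) 2 = ((n % 2 : Nat) : Int) := by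
      exact_mod_cast PySem.Int.mod_natCast n 2
    rw [hfd, hmd]
    by_cases h2 : 2 ≤ n
    · rw [pvToDigitsTwoRec n h2, List.reverse_append, List.reverse_singleton]
      simp only [List.singleton_append, List.map_cons]
      rw [ih (n / 2) (Nat.div_lt_self (by omega) (by omega)) (by omega)]
      congr 1
      rcases Nat.mod_two_eq_zero_or_one n with hm | hm <;> rw [hm] <;> decide
    · have h1 : n = 1 := by omega
      subst h1
      have : pvSeqLoop ((1 / 2 : Nat) : Int) = [] := by
        rw [pvSeqLoop]; rw [dif_neg (by norm_num)]
      rw [this]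
      decide

theorem pvFoldAppend (l : List Int) (init : List Int) :
    l.foldl (fun s _ => s ++ [(0 : Int)]) init = init ++ List.replicate l.length 0 := by
  induction l generalizing init with
  | nil => simp
  | cons a t ih => simp [ih, List.replicate_succ]

-- ===== VERDICT =====
theorem getSequenceFromInt_spec : Claim_equal_getSequenceFromInt := by
  intro i _
  unfold Spec_getSequenceFromInt getSequenceFromInt getSequenceFromInt_alt
  by_cases hle : i ≤ 0
  · rw [if_pos hle]
    have hloop : pvSeqLoop i = [] := by
      rw [pvSeqLoop]; rw [dif_neg (by omega)]
    simp only [hloop]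
    decide
  · rw [if_neg hle]
    obtain ⟨n, rfl⟩ : ∃ n : Nat, i = (n : Int) := ⟨i.toNat, by omega⟩
    have hn : 0 < n := by exact_mod_cast (by omega : (0:Int) < (n:Int))
    -- B's binary string for a positive int
    have hneg : ¬ ((n : Int) < 0) := by omega
    have hbin : PySem.Int.toBinChars (n : Int) = Nat.toDigits 2 n := by
      simp [PySem.Int.toBinChars, hneg]
    rw [hbin]
    unfold pvLjust
    rw [List.map_append, pvRevMap n hn]
    have hrep : (List.replicate (6 - (Nat.toDigits 2 n).reverse.length) '0').map pvDigitInt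
        = List.replicate (6 - (Nat.toDigits 2 n).reverse.length) (0 : Int) := by
      rw [List.map_replicate]; rfl
    rw [hrep]
    -- A's padding loop
    have hlen : (pvSeqLoop (n : Int)).length = (Nat.toDigits 2 n).reverse.length := by
      rw [← pvRevMap n hn, List.length_map]
    rw [PySem.List.pyRange_one, pvFoldAppend]
    simp only [List.length_map, List.length_range, hlen]
    rw [show ((6 : Int) - ((Nat.toDigits 2 n).reverse.length : Int)).toNat
        = 6 - (Nat.toDigits 2 n).reverse.length by omega]
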